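-- pv_equiv track=rewrite | github.com/CCHidalgoG/prueba_bancolombia_cristianH | scripts/modelling.py | limpiar_nombres_columnas
-- ===== SOURCE A (Python) =====
-- def limpiar_nombres_columnas(columnas):
--     columnas_limpias = []
--     for col in columnas:
--         # Reemplazar espacios, puntos, y caracteres especiales
--         nuevo_nombre = (col.lower()
--                         .replace(' ', '_')
--                         .replace('.', '')
--                         .replace('&', 'and')
--                         .replace('/', '_')
--                         .replace('-', '_')
--                         .replace(',', ''))
--         columnas_limpias.append(nuevo_nombre)
--     return columnas_limpias
-- ===== SOURCE B (Python) =====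
-- def limpiar_nombres_columnas(columnas):
--     sub = {' ': '_', '.': '', '&': 'and', '/': '_', '-': '_', ',': ''}
--     return [''.join(sub.get(ch, ch) for ch in col.lower()) for col in columnas]
-- ===== Notes on version B (the rewrite author's own statement) =====
-- stated objective: idiomatic
-- what changed: Replaces six sequential full-string .replace scans per column by one character-by-character pass that joins lookups in a substitution dict built once.
import Mathlib
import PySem

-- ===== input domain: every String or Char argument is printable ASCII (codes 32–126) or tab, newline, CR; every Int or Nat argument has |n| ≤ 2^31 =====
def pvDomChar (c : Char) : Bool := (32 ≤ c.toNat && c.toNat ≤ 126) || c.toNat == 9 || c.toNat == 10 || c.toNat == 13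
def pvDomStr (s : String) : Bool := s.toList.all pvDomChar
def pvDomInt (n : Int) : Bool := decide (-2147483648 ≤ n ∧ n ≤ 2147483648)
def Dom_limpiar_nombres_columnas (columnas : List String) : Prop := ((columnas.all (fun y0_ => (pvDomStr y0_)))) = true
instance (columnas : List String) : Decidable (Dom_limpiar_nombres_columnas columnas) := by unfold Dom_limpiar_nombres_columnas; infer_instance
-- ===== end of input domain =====

-- B replaces six sequential full-string .replace scans per column by one per-character
-- pass joining lookups in a substitution dict built once (objective: idiomatic).

-- ===== PORT A =====
def limpiar_nombres_columnas (columnas : List String) : List String :=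
  columnas.foldl
    (fun columnas_limpias col =>
      let nuevo_nombre :=
        PySem.Str.replace
          (PySem.Str.replace
            (PySem.Str.replace
              (PySem.Str.replace
                (PySem.Str.replace
                  (PySem.Str.replace (PySem.Str.lower col) " " "_")
                  "." "")
                "&" "and")
              "/" "_")
            "-" "_")
          "," ""
      columnas_limpias ++ [nuevo_nombre])
    []

-- ===== PORT B =====
def pvSubDict : PySem.Dict Char String :=
  PySem.Dict.ofList [(' ', "_"), ('.', ""), ('&', "and"), ('/', "_"), ('-', "_"), (',', "")]

def limpiar_nombres_columnas_alt (columnas : List String) : List String :=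
  columnas.map (fun col =>
    PySem.Str.join ""
      ((PySem.Str.lower col).toList.map
        (fun ch => PySem.Dict.getD pvSubDict ch (String.ofList [ch]))))

-- ===== PRECONDITION & SPEC =====
def Spec_limpiar_nombres_columnas (columnas : List String) (out : List String) : Prop := out = limpiar_nombres_columnas_alt columnas
instance (columnas : List String) (out : List String) : Decidable (Spec_limpiar_nombres_columnas columnas out) := by unfold Spec_limpiar_nombres_columnas; infer_instance

-- ===== CLAIM (what is proved, stated in full; the proofs are below) =====
def Claim_equal_limpiar_nombres_columnas : Prop := ∀ (columnas : List String), Dom_limpiar_nombres_columnas columnas → Spec_limpiar_nombres_columnas columnas (limpiar_nombres_columnas columnas)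

-- ===== LEMMAS AND PROOFS =====

-- single-character replacement as a flatMap
def pvRep (c : Char) (new : List Char) (l : List Char) : List Char :=
  l.flatMap (fun x => if x = c then new else [x])

lemma pvRep_cons (c : Char) (new : List Char) (x : Char) (t : List Char) :
    pvRep c new (x :: t) = (if x = c then new else [x]) ++ pvRep c new t := by
  simp [pvRep]

lemma go_single (c : Char) (new : List Char) :
    ∀ (fuel : Nat) (l acc : List Char), l.length ≤ fuel →
      PySem.Chars.replace.go [c] new fuel l acc = acc.reverse ++ pvRep c new l := by
  intro fuel
  induction fuel with
  | zero =>
    intro l acc h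
    have : l = [] := List.length_eq_zero_iff.mp (Nat.le_zero.mp h)
    subst this
    simp [PySem.Chars.replace.go, pvRep]
  | succ n ih =>
    intro l acc h
    cases l with
    | nil => simp [PySem.Chars.replace.go, pvRep]
    | cons x t =>
      simp only [PySem.Chars.replace.go]
      by_cases hx : x = c
      · subst hx
        have hpre : List.isPrefixOf [x] (x :: t) = true := by
          simp [List.isPrefixOf]
        rw [if_pos hpre]
        rw [show List.drop [x].length (x :: t) = t from rfl]
        simp only [List.length_cons] at h
        rw [ih t (new.reverse ++ acc) (by omega)]
        simp [pvRep_cons]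
      · have hpre : List.isPrefixOf [c] (x :: t) = false := by
          simp [List.isPrefixOf]
          exact fun hc => (hx hc.symm).elim
        rw [if_neg (by simp [hpre])]
        simp only [List.length_cons] at h
        rw [ih t (x :: acc) (by omega)]
        simp [pvRep_cons, hx]

lemma replace_single (c : Char) (new l : List Char) :
    PySem.Chars.replace l [c] new = pvRep c new l := by
  rw [PySem.Chars.replace]
  rw [if_neg (by simp)]
  rw [go_single c new l.length l [] (le_refl _)]
  simp

-- per-character image of B's dictionary lookup
def pvSubF (x : Char) : List Char :=
  if x = ' ' then ['_'] else if x = '.' then [] else if x = '&' then ['a','n','d']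
  else if x = '/' then ['_'] else if x = '-' then ['_'] else if x = ',' then [] else [x]

lemma pvRep_append (c : Char) (new : List Char) (a b : List Char) :
    pvRep c new (a ++ b) = pvRep c new a ++ pvRep c new b := by
  simp [pvRep]

-- the six chained single-char replacements collapse to one pass over the characters
lemma chain_eq (l : List Char) :
    pvRep ',' [] (pvRep '-' ['_'] (pvRep '/' ['_'] (pvRep '&' ['a','n','d']
      (pvRep '.' [] (pvRep ' ' ['_'] l))))) = l.flatMap pvSubF := by
  induction l with
  | nil => rfl
  | cons x t ih =>
    rw [pvRep_cons, pvRep_append, pvRep_append, pvRep_append, pvRep_append, pvRep_append,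
        List.flatMap_cons, ih]
    congr 1
    by_cases h1 : x = ' '
    · subst h1; rfl
    by_cases h2 : x = '.'
    · subst h2; rfl
    by_cases h3 : x = '&'
    · subst h3; rfl
    by_cases h4 : x = '/'
    · subst h4; rfl
    by_cases h5 : x = '-'
    · subst h5; rfl
    by_cases h6 : x = ','
    · subst h6; rfl
    simp [pvSubF, pvRep, h1, h2, h3, h4, h5, h6]

lemma pvJoin_nil_flatten : ∀ (parts : List (List Char)),
    PySem.Chars.join [] parts = parts.flatten := by
  intro parts
  induction parts with
  | nil => rfl
  | cons a t ih =>
    cases t with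
    | nil => simp [PySem.Chars.join, List.intercalate]
    | cons b t' =>
      simp only [PySem.Chars.join, List.intercalate] at ih ⊢
      simp [List.intersperse] at ih ⊢
      exact ih

lemma getD_eq_subF (x : Char) :
    (PySem.Dict.getD pvSubDict x (String.ofList [x])).toList = pvSubF x := by
  by_cases h1 : x = ' '
  · subst h1; rfl
  by_cases h2 : x = '.'
  · subst h2; rfl
  by_cases h3 : x = '&'
  · subst h3; rfl
  by_cases h4 : x = '/'
  · subst h4; rfl
  by_cases h5 : x = '-'
  · subst h5; rfl
  by_cases h6 : x = ','
  · subst h6; rfl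
  · have hitems : pvSubDict.items =
        [(' ', "_"), ('.', ""), ('&', "and"), ('/', "_"), ('-', "_"), (',', "")] := by rfl
    have b1 : (' ' == x) = false := by simp [Ne.symm h1]
    have b2 : ('.' == x) = false := by simp [Ne.symm h2]
    have b3 : ('&' == x) = false := by simp [Ne.symm h3]
    have b4 : ('/' == x) = false := by simp [Ne.symm h4]
    have b5 : ('-' == x) = false := by simp [Ne.symm h5]
    have b6 : (',' == x) = false := by simp [Ne.symm h6]
    simp [PySem.Dict.getD, PySem.Dict.get?, hitems, pvSubF, List.find?,
      b1, b2, b3, b4, b5, b6, h1, h2, h3, h4, h5, h6]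

lemma per_col (col : String) :
    PySem.Str.replace
      (PySem.Str.replace
        (PySem.Str.replace
          (PySem.Str.replace
            (PySem.Str.replace
              (PySem.Str.replace (PySem.Str.lower col) " " "_") "." "")
            "&" "and") "/" "_") "-" "_") "," "" =
    PySem.Str.join ""
      ((PySem.Str.lower col).toList.map
        (fun ch => PySem.Dict.getD pvSubDict ch (String.ofList [ch]))) := by
  apply String.toList_injective
  rw [PySem.Str.toList_join]
  simp only [PySem.Str.toList_replace]
  have hjoin : ∀ (parts : List (List Char)), PySem.Chars.join [] parts = parts.flatten :=
    pvJoin_nil_flatten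
  show PySem.Chars.replace _ ",".toList "".toList = _
  have e1 : (" ".toList : List Char) = [' '] := rfl
  have e2 : (".".toList : List Char) = ['.'] := rfl
  have e3 : ("&".toList : List Char) = ['&'] := rfl
  have e4 : ("/".toList : List Char) = ['/'] := rfl
  have e5 : ("-".toList : List Char) = ['-'] := rfl
  have e6 : (",".toList : List Char) = [','] := rfl
  have eand : ("and".toList : List Char) = ['a','n','d'] := rfl
  have eu : ("_".toList : List Char) = ['_'] := rfl
  have ee : ("".toList : List Char) = [] := rfl
  rw [e1, e2, e3, e4, e5, e6, eand, eu, ee,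
      replace_single, replace_single, replace_single, replace_single,
      replace_single, replace_single, chain_eq, hjoin, List.map_map,
      List.flatMap_def]
  congr 1
  rw [List.map_congr_left]
  intro x _
  exact (getD_eq_subF x).symm

lemma foldl_append_map (f : String → String) :
    ∀ (xs : List String) (acc : List String),
      xs.foldl (fun a c => a ++ [f c]) acc = acc ++ xs.map f := by
  intro xs
  induction xs with
  | nil => intro acc; simp
  | cons x t ih => intro acc; simp [ih]

-- ===== VERDICT (by name: the statement is the Claim_ definition above) =====
theorem limpiar_nombres_columnas_spec : Claim_equal_limpiar_nombres_columnas := by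
  intro columnas _
  show limpiar_nombres_columnas columnas = limpiar_nombres_columnas_alt columnas
  unfold limpiar_nombres_columnas limpiar_nombres_columnas_alt
  rw [foldl_append_map]
  simp only [List.nil_append]
  apply List.map_congr_left
  intro col _
  exact per_col col
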